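-- pv_equiv track=rewrite | github.com/jcraig949jfi/Prometheus | prometheus_math/databases/mahler.py | _coeff_disc_proxy
-- ===== SOURCE A (Python) =====
-- def _coeff_disc_proxy(coeffs: list[int]) -> int:
--     """Cheap O(n^2) proxy for |discriminant| of a coefficient vector.
--
--     Real polynomial discriminants need numerical root-finding; this
--     proxy is sum_{i!=j} |a_i - a_j|^2 + sum |a_i|, which is monotone
--     in the "spread" of the coefficient vector and usable as an
--     ordering key when ranking entries by structural simplicity.
--     """
--     cs = list(coeffs)
--     n = len(cs)
--     s = sum(abs(c) for c in cs)
--     for i in range(n):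
--         for j in range(i + 1, n):
--             s += (cs[i] - cs[j]) ** 2
--     return s
-- ===== SOURCE B (Python) =====
-- def _coeff_disc_proxy(coeffs: list[int]) -> int:
--     # One pass: sum_{i<j}(a_i-a_j)^2 == n*sum(a^2) - (sum a)^2, plus sum |a|.
--     n = 0
--     s = 0
--     q = 0
--     ab = 0
--     for c in coeffs:
--         n += 1
--         s += c
--         q += c * c
--         ab += abs(c)
--     return n * q - s * s + ab
-- ===== Notes on version B (the rewrite author's own statement) =====
-- stated objective: faster
-- what changed: Replaced the O(n^2) nested index loops over all pairs by a single pass using the algebraic identity sum_{i<j}(a_i-a_j)^2 = n*sum(a^2) - (sum a)^2, accumulating count, sum, sum of squares and sum of absolute values together.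
import Mathlib
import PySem

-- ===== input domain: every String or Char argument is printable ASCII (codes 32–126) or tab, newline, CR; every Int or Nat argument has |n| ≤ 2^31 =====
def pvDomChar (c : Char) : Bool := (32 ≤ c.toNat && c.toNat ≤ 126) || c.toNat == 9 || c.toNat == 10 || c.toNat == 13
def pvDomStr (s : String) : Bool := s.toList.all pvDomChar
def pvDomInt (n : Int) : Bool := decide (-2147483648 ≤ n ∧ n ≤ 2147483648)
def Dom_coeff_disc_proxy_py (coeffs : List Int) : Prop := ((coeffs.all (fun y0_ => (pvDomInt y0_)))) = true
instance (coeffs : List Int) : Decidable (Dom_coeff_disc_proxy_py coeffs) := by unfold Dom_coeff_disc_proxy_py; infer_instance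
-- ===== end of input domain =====

-- B replaces A's O(n^2) pair loop by a one-pass closed form (faster, asymptotic).

-- ===== PORT A =====
-- Nested index loops; indices are always in range, so pyGetD's default 0 is never used.
def coeff_disc_proxy_py (coeffs : List Int) : Int :=
  let cs := coeffs
  let n : Int := cs.length
  let s := (cs.map (fun c => |c|)).sum
  (PySem.List.pyRange 0 n 1).foldl (fun s i =>
    (PySem.List.pyRange (i + 1) n 1).foldl (fun s j =>
      s + (PySem.List.pyGetD cs i 0 - PySem.List.pyGetD cs j 0) ^ 2) s) s

-- ===== PORT B =====
-- One pass accumulating (count, sum, sum of squares, sum of |·|), then the closed form.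
def coeff_disc_proxy_py_alt (coeffs : List Int) : Int :=
  let st := coeffs.foldl
    (fun (st : Int × Int × Int × Int) c =>
      (st.1 + 1, st.2.1 + c, st.2.2.1 + c * c, st.2.2.2 + |c|)) (0, 0, 0, 0)
  st.1 * st.2.2.1 - st.2.1 * st.2.1 + st.2.2.2

-- ===== PRECONDITION & SPEC =====
def Spec_coeff_disc_proxy_py (coeffs : List Int) (out : Int) : Prop := out = coeff_disc_proxy_py_alt coeffs
instance (coeffs : List Int) (out : Int) : Decidable (Spec_coeff_disc_proxy_py coeffs out) := by unfold Spec_coeff_disc_proxy_py; infer_instance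

-- ===== CLAIM (what is proved, stated in full; the proofs are below) =====
def Claim_equal_coeff_disc_proxy_py : Prop := ∀ (coeffs : List Int), Dom_coeff_disc_proxy_py coeffs → Spec_coeff_disc_proxy_py coeffs (coeff_disc_proxy_py coeffs)

-- ===== LEMMAS AND PROOFS =====

/-- Sum of squared differences of one element against a list, expanded. -/
theorem sum_sq_diff (x : Int) (xs : List Int) :
    (xs.map (fun y => (x - y) ^ 2)).sum
      = (xs.length : Int) * x ^ 2 - 2 * x * xs.sum + (xs.map (fun y => y * y)).sum := by
  induction xs with
  | nil => simp
  | cons y t ih =>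
    simp only [List.map_cons, List.sum_cons, List.length_cons, ih]
    push_cast
    ring

/-- Head-recursive pairwise squared-difference sum. -/
def pairSq : List Int → Int
  | [] => 0
  | x :: xs => (xs.map (fun y => (x - y) ^ 2)).sum + pairSq xs

/-- Closed form for the pairwise sum. -/
theorem pairSq_closed (cs : List Int) :
    pairSq cs = (cs.length : Int) * (cs.map (fun y => y * y)).sum - cs.sum * cs.sum := by
  induction cs with
  | nil => simp [pairSq]
  | cons x t ih =>
    simp only [pairSq, sum_sq_diff, ih, List.length_cons, List.sum_cons, List.map_cons]
    push_cast
    ring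

/-- A's index-based double sum equals the head-recursive pairwise sum. -/
theorem indexSum_eq_pairSq (cs : List Int) :
    ((List.range cs.length).map (fun k =>
        ((cs.drop (k + 1)).map (fun y => (cs.getD k 0 - y) ^ 2)).sum)).sum = pairSq cs := by
  induction cs with
  | nil => simp [pairSq]
  | cons x t ih =>
    rw [List.length_cons, List.range_succ_eq_map]
    simp only [List.map_cons, List.map_map, List.sum_cons, Function.comp_def,
      List.getD_cons_succ, List.getD_cons_zero, List.drop_succ_cons]
    rw [ih]
    simp [pairSq]

/-- A's double loop computes the initial value plus the pairwise sum. -/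
theorem loopA_eq (cs : List Int) (s : Int) :
    (PySem.List.pyRange 0 (cs.length : Int) 1).foldl (fun s i =>
        (PySem.List.pyRange (i + 1) (cs.length : Int) 1).foldl (fun s j =>
          s + (PySem.List.pyGetD cs i 0 - PySem.List.pyGetD cs j 0) ^ 2) s) s
      = s + pairSq cs := by
  rw [PySem.List.foldl_congr_mem
      (l := PySem.List.pyRange 0 (cs.length : Int) 1) (init := s)
      (f := fun s i => (PySem.List.pyRange (i + 1) (cs.length : Int) 1).foldl (fun s j =>
        s + (PySem.List.pyGetD cs i 0 - PySem.List.pyGetD cs j 0) ^ 2) s)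
      (g := fun s i => s + ((PySem.List.pyRange (i + 1) (cs.length : Int) 1).map
        (fun j => (PySem.List.pyGetD cs i 0 - PySem.List.pyGetD cs j 0) ^ 2)).sum)
      (fun acc i _ => PySem.List.foldl_add _ _ _)]
  rw [PySem.List.foldl_add]
  congr 1
  rw [PySem.List.pyRange_one]
  simp only [Int.sub_zero, Int.toNat_natCast, List.map_map, Function.comp_def, Int.zero_add]
  rw [← indexSum_eq_pairSq]
  apply congrArg
  apply List.map_congr_left
  intro k hk
  rw [List.mem_range] at hk
  have h1 : PySem.List.pyGetD cs (k : Int) 0 = cs.getD k 0 := PySem.List.pyGetD_natCast cs k 0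
  have h2 : (PySem.List.pyRange ((k : Int) + 1) (cs.length : Int) 1).map
      (fun j => (PySem.List.pyGetD cs (k : Int) 0 - PySem.List.pyGetD cs j 0) ^ 2)
      = ((PySem.List.pyRange ((k : Int) + 1) (cs.length : Int) 1).map
        (fun j => PySem.List.pyGetD cs j 0)).map
        (fun y => (cs.getD k 0 - y) ^ 2) := by
    rw [List.map_map]
    simp [Function.comp_def, h1]
  rw [h2, PySem.List.map_pyGetD_pyRange' cs 0 (a := (k : Int) + 1) (by positivity)]
  norm_num

/-- B's fold computes (length, sum, sum of squares, sum of |·|) shifted by the initial state. -/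
theorem alt_fold (cs : List Int) (st : Int × Int × Int × Int) :
    cs.foldl (fun (st : Int × Int × Int × Int) c =>
        (st.1 + 1, st.2.1 + c, st.2.2.1 + c * c, st.2.2.2 + |c|)) st
      = (st.1 + cs.length, st.2.1 + cs.sum, st.2.2.1 + (cs.map (fun y => y * y)).sum,
         st.2.2.2 + (cs.map (fun c => |c|)).sum) := by
  induction cs generalizing st with
  | nil => simp
  | cons c t ih =>
    simp only [List.foldl_cons, ih, List.length_cons, List.sum_cons, List.map_cons, Prod.mk.injEq]
    push_cast
    refine ⟨by ring, by ring, by ring, by ring⟩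

-- ===== VERDICT (by name: the statement is the Claim_ definition above) =====
theorem coeff_disc_proxy_py_spec : Claim_equal_coeff_disc_proxy_py := by
  intro cs _
  unfold Spec_coeff_disc_proxy_py coeff_disc_proxy_py coeff_disc_proxy_py_alt
  simp only []
  rw [alt_fold, loopA_eq, pairSq_closed]
  ring
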